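-- pv_equiv track=rewrite | github.com/fauzaanu/haikuiz | src/helpers.py | remove_verbs
-- ===== SOURCE A (Python) =====
-- def remove_verbs(string_to_convert):
--     verbs = ['is', 'are', 'am', 'was', 'were', 'be', 'been', 'being', 'have', 'has', 'had', 'do', 'does', 'did',
--              'shall', 'will', 'should', 'would', 'may', 'might', 'must', 'can', 'could', "the"]
--     prepositions = [
--         'aboard', 'about', 'above', 'across', 'after', 'against', 'along', 'amid', 'among', 'anti', 'around',
--         'as', 'at', 'before', 'behind', 'below', 'beneath', 'beside', 'besides', 'between', 'beyond', 'but', 'by',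
--         'concerning', 'considering', 'despite', 'down', 'during', 'except', 'excepting', 'excluding', 'following',
--         'for', 'from', 'in', 'inside', 'into', 'like', 'minus', 'near', 'of', 'off', 'on', 'onto', 'opposite',
--         'outside',
--         'over', 'past', 'per', 'plus', 'regarding', 'round', 'save', 'since', 'than', 'through', 'to', 'toward',
--         'towards', 'under', 'underneath', 'unlike', 'until', 'up', 'upon', 'versus', 'via', 'with', 'within', 'without'
--     ]
--     verb_string = str()
--     final_string = str()
--
--     for word in string_to_convert.split():
--         if word.lower() not in verbs:
--             verb_string += word + ' '
--
--     for word in verb_string.split():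
--         if word.lower() not in prepositions:
--             final_string += word + ' '
--
--     return final_string
-- ===== SOURCE B (Python) =====
-- _STOPWORDS = frozenset([
--     'is', 'are', 'am', 'was', 'were', 'be', 'been', 'being', 'have', 'has', 'had', 'do', 'does', 'did',
--     'shall', 'will', 'should', 'would', 'may', 'might', 'must', 'can', 'could', 'the',
--     'aboard', 'about', 'above', 'across', 'after', 'against', 'along', 'amid', 'among', 'anti', 'around',
--     'as', 'at', 'before', 'behind', 'below', 'beneath', 'beside', 'besides', 'between', 'beyond', 'but', 'by',
--     'concerning', 'considering', 'despite', 'down', 'during', 'except', 'excepting', 'excluding', 'following',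
--     'for', 'from', 'in', 'inside', 'into', 'like', 'minus', 'near', 'of', 'off', 'on', 'onto', 'opposite',
--     'outside',
--     'over', 'past', 'per', 'plus', 'regarding', 'round', 'save', 'since', 'than', 'through', 'to', 'toward',
--     'towards', 'under', 'underneath', 'unlike', 'until', 'up', 'upon', 'versus', 'via', 'with', 'within', 'without',
-- ])
--
--
-- def remove_verbs(string_to_convert):
--     # single character-level scan: no split(), no intermediate string rebuild
--     out = []
--     cur = []
--     for ch in string_to_convert:
--         if ch.isspace():
--             if cur:
--                 word = ''.join(cur)
--                 if word.lower() not in _STOPWORDS: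
--                     out.append(word + ' ')
--                 cur = []
--         else:
--             cur.append(ch)
--     if cur:
--         word = ''.join(cur)
--         if word.lower() not in _STOPWORDS:
--             out.append(word + ' ')
--     return ''.join(out)
-- ===== Notes on version B (the rewrite author's own statement) =====
-- stated objective: alternative
-- what changed: B replaces A's two staged split/filter/rebuild passes by a single character-level state machine that accumulates the current word and emits it at each whitespace boundary unless its lowercase form is in one combined stopword set, never calling split() or rebuilding an intermediate string.
import Mathlib
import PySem

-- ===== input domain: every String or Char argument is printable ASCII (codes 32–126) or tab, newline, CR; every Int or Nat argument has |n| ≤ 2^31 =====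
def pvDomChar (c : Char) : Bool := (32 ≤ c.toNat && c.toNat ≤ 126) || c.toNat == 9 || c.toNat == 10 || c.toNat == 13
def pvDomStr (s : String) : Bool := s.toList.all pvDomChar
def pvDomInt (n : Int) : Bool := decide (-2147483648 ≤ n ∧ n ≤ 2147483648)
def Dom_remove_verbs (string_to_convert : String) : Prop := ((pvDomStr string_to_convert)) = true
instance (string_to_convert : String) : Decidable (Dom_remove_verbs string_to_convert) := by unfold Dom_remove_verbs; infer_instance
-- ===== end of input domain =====

-- B replaces A's two staged split/filter/string-rebuild passes by a single character-level
-- state machine over the string against one combined stopword set; objective: alternative.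

-- ===== PORT A =====
def pvVerbs : List String := ["is", "are", "am", "was", "were", "be", "been", "being", "have", "has", "had", "do", "does", "did",
  "shall", "will", "should", "would", "may", "might", "must", "can", "could", "the"]

def pvPrepositions : List String := [
  "aboard", "about", "above", "across", "after", "against", "along", "amid", "among", "anti", "around",
  "as", "at", "before", "behind", "below", "beneath", "beside", "besides", "between", "beyond", "but", "by",
  "concerning", "considering", "despite", "down", "during", "except", "excepting", "excluding", "following",
  "for", "from", "in", "inside", "into", "like", "minus", "near", "of", "off", "on", "onto", "opposite",
  "outside",
  "over", "past", "per", "plus", "regarding", "round", "save", "since", "than", "through", "to", "toward",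
  "towards", "under", "underneath", "unlike", "until", "up", "upon", "versus", "via", "with", "within", "without"]

def remove_verbs (string_to_convert : String) : String :=
  let verbs := pvVerbs
  let prepositions := pvPrepositions
  let verb_string : String :=
    (PySem.Str.split₀ string_to_convert).foldl
      (fun acc word => if verbs.contains (PySem.Str.lower word) = false then acc ++ (word ++ " ") else acc) ""
  let final_string : String :=
    (PySem.Str.split₀ verb_string).foldl
      (fun acc word => if prepositions.contains (PySem.Str.lower word) = false then acc ++ (word ++ " ") else acc) ""
  final_string

-- ===== PORT B =====
-- Source B's _STOPWORDS: one frozenset literal holding every stopword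
def pvStopList : List String := ["is", "are", "am", "was", "were", "be", "been", "being", "have", "has", "had", "do", "does", "did",
  "shall", "will", "should", "would", "may", "might", "must", "can", "could", "the",
  "aboard", "about", "above", "across", "after", "against", "along", "amid", "among", "anti", "around",
  "as", "at", "before", "behind", "below", "beneath", "beside", "besides", "between", "beyond", "but", "by",
  "concerning", "considering", "despite", "down", "during", "except", "excepting", "excluding", "following",
  "for", "from", "in", "inside", "into", "like", "minus", "near", "of", "off", "on", "onto", "opposite",
  "outside",
  "over", "past", "per", "plus", "regarding", "round", "save", "since", "than", "through", "to", "toward",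
  "towards", "under", "underneath", "unlike", "until", "up", "upon", "versus", "via", "with", "within", "without"]

def pvStop : List String := PySem.Set.ofList pvStopList

-- the body of Source B's two identical 'if cur: … flush' blocks
def pvFlush (cur : List Char) (out : List String) : List String :=
  if cur.isEmpty then out
  else
    let word := String.ofList cur
    if pvStop.contains (PySem.Str.lower word) then out else out ++ [word ++ " "]

-- Source B's character loop: cur accumulates the current word, out the emitted pieces
def pvScan : List Char → List Char → List String → List String
  | [], cur, out => pvFlush cur out
  | c :: cs, cur, out =>
    if PySem.Chars.isspace c then pvScan cs [] (pvFlush cur out)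
    else pvScan cs (cur ++ [c]) out

def remove_verbs_alt (string_to_convert : String) : String :=
  PySem.Str.join "" (pvScan string_to_convert.toList [] [])

-- ===== PRECONDITION & SPEC =====
def Spec_remove_verbs (string_to_convert : String) (out : String) : Prop := out = remove_verbs_alt string_to_convert
instance (string_to_convert : String) (out : String) : Decidable (Spec_remove_verbs string_to_convert out) := by unfold Spec_remove_verbs; infer_instance

-- ===== CLAIM (what is proved, stated in full; the proofs are below) =====
def Claim_equal_remove_verbs : Prop := ∀ (string_to_convert : String), Dom_remove_verbs string_to_convert → Spec_remove_verbs string_to_convert (remove_verbs string_to_convert)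

-- ===== LEMMAS AND PROOFS =====

-- the common normal form both ports are reduced to
def pvForm (s : String) : String :=
  PySem.Str.join ""
    (((PySem.Str.split₀ s).filter (fun w => !(pvStop.contains (PySem.Str.lower w)))).map
      (fun w => w ++ " "))

def pvKeep? (w : List Char) : Option String :=
  if pvStop.contains (PySem.Str.lower (String.ofList w)) then none else some (String.ofList w ++ " ")

theorem pvStopList_eq : pvStopList = pvVerbs ++ pvPrepositions := rfl

theorem pv_stop_contains (x : String) :
    pvStop.contains x = (pvVerbs.contains x || pvPrepositions.contains x) := by
  have h1 : x ∈ pvStop ↔ (x ∈ pvVerbs ∨ x ∈ pvPrepositions) := by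
    simp [pvStop, pvStopList_eq, PySem.Set.mem_ofList]
  simp only [List.contains_eq_mem]
  by_cases h : x ∈ pvVerbs <;> by_cases h2 : x ∈ pvPrepositions <;> simp_all

theorem pv_split₀_go_words (s : List Char) : ∀ (cur : List Char) (acc : List (List Char)),
    (∀ c ∈ cur, PySem.Chars.isspace c = false) →
    (∀ w ∈ acc, w ≠ [] ∧ ∀ c ∈ w, PySem.Chars.isspace c = false) →
    ∀ w ∈ PySem.Chars.split₀.go s cur acc, w ≠ [] ∧ ∀ c ∈ w, PySem.Chars.isspace c = false := by
  induction s with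
  | nil =>
    intro cur acc hcur hacc w hw
    simp only [PySem.Chars.split₀.go] at hw
    split at hw
    · exact hacc _ (by simpa using hw)
    · rcases (by simpa using hw : w ∈ acc ∨ w = cur.reverse) with h | h
      · exact hacc _ h
      · subst h
        rename_i hne
        constructor
        · simpa [List.isEmpty_iff] using hne
        · intro c hc; exact hcur c (by simpa using hc)
  | cons c rest ih =>
    intro cur acc hcur hacc w hw
    simp only [PySem.Chars.split₀.go] at hw
    by_cases hs : PySem.Chars.isspace c = true
    · rw [if_pos hs] at hw
      split at hw
      · exact ih [] acc (by simp) hacc w hw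
      · rename_i hne
        refine ih [] _ (by simp) ?_ w hw
        intro v hv
        rcases List.mem_cons.mp hv with h | h
        · subst h
          exact ⟨by simpa [List.isEmpty_iff] using hne, fun d hd => hcur d (by simpa using hd)⟩
        · exact hacc _ h
    · rw [if_neg hs] at hw
      refine ih (c :: cur) acc ?_ hacc w hw
      intro d hd
      rcases List.mem_cons.mp hd with h | h
      · subst h; simpa using hs
      · exact hcur d h

theorem pv_split₀_words (s : List Char) :
    ∀ w ∈ PySem.Chars.split₀ s, w ≠ [] ∧ ∀ c ∈ w, PySem.Chars.isspace c = false :=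
  pv_split₀_go_words s [] [] (by simp) (by simp)

theorem pv_go_word (w : List Char) (hw : ∀ c ∈ w, PySem.Chars.isspace c = false) :
    ∀ (cs cur : List Char) (acc : List (List Char)),
      PySem.Chars.split₀.go (w ++ cs) cur acc = PySem.Chars.split₀.go cs (w.reverse ++ cur) acc := by
  induction w with
  | nil => intro cs cur acc; simp
  | cons c rest ih =>
    intro cs cur acc
    have hc : PySem.Chars.isspace c = false := hw c (by simp)
    simp only [List.cons_append, PySem.Chars.split₀.go, hc]
    rw [if_neg (by simp)]
    simpa using ih (fun d hd => hw d (by simp [hd])) cs (c :: cur) acc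

theorem pv_go_rebuild (ws : List (List Char))
    (h : ∀ w ∈ ws, w ≠ [] ∧ ∀ c ∈ w, PySem.Chars.isspace c = false) :
    ∀ acc, PySem.Chars.split₀.go (ws.flatMap (fun w => w ++ [' '])) [] acc = acc.reverse ++ ws := by
  induction ws with
  | nil => intro acc; simp [PySem.Chars.split₀.go]
  | cons w rest ih =>
    intro acc
    obtain ⟨hne, hns⟩ := h w (by simp)
    have hsplit : List.flatMap (fun w => w ++ [' ']) (w :: rest)
        = w ++ (' ' :: List.flatMap (fun w => w ++ [' ']) rest) := by simp
    rw [hsplit, pv_go_word w hns]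
    simp only [PySem.Chars.split₀.go]
    rw [if_pos (by decide)]
    rw [if_neg (by simp [List.isEmpty_iff, hne])]
    rw [ih (fun v hv => h v (by simp [hv]))]
    simp

theorem pv_split₀_rebuild (ws : List (List Char))
    (h : ∀ w ∈ ws, w ≠ [] ∧ ∀ c ∈ w, PySem.Chars.isspace c = false) :
    PySem.Chars.split₀ (ws.flatMap (fun w => w ++ [' '])) = ws := by
  simpa using pv_go_rebuild ws h []

theorem pv_foldl_toList (p : String → Bool) (l : List String) (init : String) :
    (l.foldl (fun acc word => if p word = false then acc ++ (word ++ " ") else acc) init).toList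
      = init.toList ++ (l.filter (fun w => !(p w))).flatMap (fun w => w.toList ++ [' ']) := by
  induction l generalizing init with
  | nil => simp
  | cons w t ih =>
    by_cases hp : p w = false
    · simp only [List.foldl_cons, List.filter_cons, hp]
      rw [ih]
      simp
    · simp only [List.foldl_cons, if_neg hp, List.filter_cons]
      rw [ih]
      simp_all

theorem pv_join_empty (xss : List (List Char)) : PySem.Chars.join [] xss = xss.flatten := by
  induction xss with
  | nil => simp [PySem.Chars.join_nil]
  | cons p rest ih =>
    cases rest with
    | nil => simp [PySem.Chars.join_singleton]
    | cons q t => rw [PySem.Chars.join_cons_cons]; simp [ih]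

-- A equals the normal form (two staged filters fuse into one filter by pv_stop_contains)
theorem pv_A_eq_form (s : String) : remove_verbs s = pvForm s := by
  show (PySem.Str.split₀ ((PySem.Str.split₀ s).foldl
      (fun acc word => if pvVerbs.contains (PySem.Str.lower word) = false then acc ++ (word ++ " ") else acc) "")).foldl
      (fun acc word => if pvPrepositions.contains (PySem.Str.lower word) = false then acc ++ (word ++ " ") else acc) ""
    = pvForm s
  set kept1 := (PySem.Str.split₀ s).filter (fun w => !(pvVerbs.contains (PySem.Str.lower w))) with hk1
  set verb_string := (PySem.Str.split₀ s).foldl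
      (fun acc word => if pvVerbs.contains (PySem.Str.lower word) = false then acc ++ (word ++ " ") else acc) "" with hv
  have hvl : verb_string.toList = (kept1.map String.toList).flatMap (fun w => w ++ [' ']) := by
    rw [hv, pv_foldl_toList (fun w => pvVerbs.contains (PySem.Str.lower w))]
    simp [hk1, List.flatMap_map]
  have hwords : ∀ w ∈ kept1.map String.toList, w ≠ [] ∧ ∀ c ∈ w, PySem.Chars.isspace c = false := by
    intro w hw
    rcases List.mem_map.mp hw with ⟨v, hv1, rfl⟩
    have hv2 : v ∈ PySem.Str.split₀ s := List.mem_of_mem_filter hv1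
    have : v.toList ∈ PySem.Chars.split₀ s.toList := by
      rw [← PySem.Str.split₀_map_toList]
      exact List.mem_map_of_mem hv2
    exact pv_split₀_words _ _ this
  have hsp : PySem.Str.split₀ verb_string = kept1 := by
    have h2 : (PySem.Str.split₀ verb_string).map String.toList = kept1.map String.toList := by
      rw [PySem.Str.split₀_map_toList, hvl, pv_split₀_rebuild _ hwords]
    exact List.map_injective_iff.mpr (fun a b hab => by
      have h3 := congrArg String.ofList hab
      simpa using h3) h2
  rw [hsp]
  have hfin : ((kept1.foldl
      (fun acc word => if pvPrepositions.contains (PySem.Str.lower word) = false then acc ++ (word ++ " ") else acc) "")).toList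
      = ((kept1.filter (fun w => !(pvPrepositions.contains (PySem.Str.lower w)))).map String.toList).flatMap
          (fun w => w ++ [' ']) := by
    rw [pv_foldl_toList (fun w => pvPrepositions.contains (PySem.Str.lower w))]
    simp [List.flatMap_map]
  have hBl : (pvForm s).toList
      = (((PySem.Str.split₀ s).filter
            (fun w => !(pvStop.contains (PySem.Str.lower w)))).map String.toList).flatMap
          (fun w => w ++ [' ']) := by
    unfold pvForm
    rw [PySem.Str.toList_join, show ("" : String).toList = [] from rfl, pv_join_empty]
    simp [List.flatMap_def, Function.comp_def]
  have hfilters : kept1.filter (fun w => !(pvPrepositions.contains (PySem.Str.lower w)))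
      = (PySem.Str.split₀ s).filter (fun w => !(pvStop.contains (PySem.Str.lower w))) := by
    rw [hk1, List.filter_filter]
    apply List.filter_congr
    intro w _
    rw [pv_stop_contains]
    cases h1 : pvVerbs.contains (PySem.Str.lower w) <;> cases h2 : pvPrepositions.contains (PySem.Str.lower w) <;> simp
  have : ((kept1.foldl
      (fun acc word => if pvPrepositions.contains (PySem.Str.lower word) = false then acc ++ (word ++ " ") else acc) "")).toList
      = (pvForm s).toList := by
    rw [hfin, hBl, hfilters]
  have h4 := congrArg String.ofList this
  simpa using h4

-- the split₀ worker is compositional in its accumulator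
theorem pv_go_acc (cs : List Char) : ∀ (cur : List Char) (acc : List (List Char)),
    PySem.Chars.split₀.go cs cur acc = acc.reverse ++ PySem.Chars.split₀.go cs cur [] := by
  induction cs with
  | nil =>
    intro cur acc
    simp only [PySem.Chars.split₀.go]
    split_ifs <;> simp
  | cons c rest ih =>
    intro cur acc
    simp only [PySem.Chars.split₀.go]
    by_cases hs : PySem.Chars.isspace c = true
    · rw [if_pos hs, if_pos hs]
      by_cases he : cur.isEmpty = true
      · rw [if_pos he, if_pos he]
        exact ih [] acc
      · rw [if_neg he, if_neg he]
        rw [ih [] (cur.reverse :: acc), ih [] [cur.reverse]]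
        simp
    · rw [if_neg hs, if_neg hs]
      exact ih (c :: cur) acc

set_option maxRecDepth 8192 in
theorem pv_flush_eq (cur : List Char) (out : List String) :
    pvFlush cur out = out ++ (if cur.isEmpty then ([] : List (List Char)) else [cur]).filterMap pvKeep? := by
  unfold pvFlush pvKeep?
  by_cases he : cur.isEmpty = true
  · simp [he]
  · rw [if_neg he, if_neg he]
    by_cases hm : PySem.Str.lower (String.ofList cur) ∈ pvStop
    · have hc : pvStop.contains (PySem.Str.lower (String.ofList cur)) = true := by
        simpa [List.contains_eq_mem] using hm
      rw [if_pos hc]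
      simp only [List.filterMap_cons, hc]
      simp
    · have hc : pvStop.contains (PySem.Str.lower (String.ofList cur)) = false := by
        simpa [List.contains_eq_mem] using hm
      rw [if_neg (by rw [hc]; simp : ¬ pvStop.contains (PySem.Str.lower (String.ofList cur)) = true)]
      simp only [List.filterMap_cons, hc]
      simp

-- B's character scan computes exactly 'keep?' mapped over split₀'s words
set_option maxRecDepth 8192 in
theorem pv_scan_eq (cs : List Char) : ∀ (cur : List Char) (out : List String),
    pvScan cs cur out = out ++ (PySem.Chars.split₀.go cs cur.reverse []).filterMap pvKeep? := by
  induction cs with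
  | nil =>
    intro cur out
    simp only [pvScan, PySem.Chars.split₀.go]
    rw [pv_flush_eq]
    by_cases he : cur = []
    · subst he; simp
    · rw [if_neg (by simp [he]), if_neg (by simp [he])]
      simp
  | cons c rest ih =>
    intro cur out
    simp only [pvScan, PySem.Chars.split₀.go]
    by_cases hs : PySem.Chars.isspace c = true
    · rw [if_pos hs, if_pos hs, ih, pv_flush_eq]
      by_cases he : cur = []
      · subst he; simp
      · rw [if_neg (by simp [he]), if_neg (by simp [he]), List.reverse_reverse,
            pv_go_acc rest [] [cur]]
        cases hk : pvKeep? cur <;> simp [hk]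
    · rw [if_neg hs, if_neg hs, ih]
      simp

theorem pv_filterMap_if (p : String → Bool) (g : String → String) (ws : List String) :
    (ws.map String.toList).filterMap
        (fun w => if p (String.ofList w) then none else some (g (String.ofList w)))
      = (ws.filter (fun w => !(p w))).map g := by
  induction ws with
  | nil => simp
  | cons w t ih =>
    simp only [List.map_cons, List.filterMap_cons, List.filter_cons]
    have hw : String.ofList w.toList = w := by simp
    rw [hw]
    by_cases hp : p w = true
    · rw [if_pos hp, hp]
      simpa using ih
    · simp only [Bool.not_eq_true] at hp
      rw [if_neg (by simp [hp]), hp]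
      simpa using ih

theorem pv_filterMap_keep (ws : List String) :
    (ws.map String.toList).filterMap pvKeep?
      = (ws.filter (fun w => !(pvStop.contains (PySem.Str.lower w)))).map (fun w => w ++ " ") := by
  unfold pvKeep?
  exact pv_filterMap_if (fun w => pvStop.contains (PySem.Str.lower w)) (fun w => w ++ " ") ws

-- B equals the normal form
set_option maxRecDepth 8192 in
theorem pv_B_eq_form (s : String) : remove_verbs_alt s = pvForm s := by
  unfold remove_verbs_alt pvForm
  rw [pv_scan_eq]
  rw [show ([] : List Char).reverse = [] from rfl]
  rw [show PySem.Chars.split₀.go s.toList [] [] = PySem.Chars.split₀ s.toList from rfl]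
  rw [← PySem.Str.split₀_map_toList, pv_filterMap_keep]
  simp

-- ===== VERDICT (by name: the statement is the Claim_ definition above) =====
theorem remove_verbs_spec : Claim_equal_remove_verbs := by
  intro s _
  unfold Spec_remove_verbs
  rw [pv_A_eq_form, pv_B_eq_form]
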